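-- pv_equiv track=rewrite | github.com/rvekeria678/pythontutorial | lc/lc_2125.py | numberOfBeams
-- ===== SOURCE A (Python) =====
-- def numberOfBeams(bank: list[str]) -> int:
--     if len(bank) < 2:
--         return 0
--     left, right, beams, bank_size = 0, 1, 0, len(bank)
--     while right < bank_size:
--         left_val = bank[left].count('1')
--         right_val = bank[right].count('1')
--
--         if left_val and right_val:
--             beams += left_val * right_val
--             left = right
--             right += 1
--         elif not right_val:
--             right += 1
--         else:
--             left += 1
--             right = left + 1
--
--     return beams
-- ===== SOURCE B (Python) =====
-- def numberOfBeams(bank: list[str]) -> int: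
--     nz = [c for c in (row.count('1') for row in bank) if c]
--     return sum(a * b for a, b in zip(nz, nz[1:]))
-- ===== Notes on version B (the rewrite author's own statement) =====
-- stated objective: faster
-- what changed: Replaced the two-pointer while loop that recounts each row's '1's on every iteration by a single pass: count ones per row once, keep the nonzero counts, and sum products of consecutive ones.
import Mathlib
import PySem

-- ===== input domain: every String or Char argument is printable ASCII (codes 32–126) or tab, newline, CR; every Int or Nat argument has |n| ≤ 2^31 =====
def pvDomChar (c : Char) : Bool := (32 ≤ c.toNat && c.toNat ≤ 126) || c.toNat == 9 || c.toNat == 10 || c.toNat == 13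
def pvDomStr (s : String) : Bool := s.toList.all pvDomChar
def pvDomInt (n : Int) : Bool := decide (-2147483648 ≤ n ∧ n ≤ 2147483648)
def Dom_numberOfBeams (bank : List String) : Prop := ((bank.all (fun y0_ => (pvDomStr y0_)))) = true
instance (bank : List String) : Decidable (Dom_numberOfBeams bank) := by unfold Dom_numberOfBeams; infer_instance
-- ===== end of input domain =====

-- B replaces A's two-pointer rescanning loop by one pass over per-row '1' counts (objective: faster, asymptotic).

-- ===== PORT A =====
-- row.count('1') as an Int (Python int)
def pyCount1 (s : String) : Int := (PySem.Str.count s "1" : Int)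

-- A's while loop, literally: the extra conjunct `left < right` is a totality guard only
-- (it holds at every reachable state; on states violating it the loop is never entered by A).
def loopA (bank : List String) (n left right beams : Int) : Int :=
  if h : right < n ∧ left < right then
    let left_val := pyCount1 ((PySem.List.pyGet? bank left).getD "")   -- bank[left]; index in range at reachable states
    let right_val := pyCount1 ((PySem.List.pyGet? bank right).getD "") -- bank[right]
    if left_val ≠ 0 ∧ right_val ≠ 0 then
      loopA bank n right (right + 1) (beams + left_val * right_val)
    else if right_val = 0 then
      loopA bank n left (right + 1) beams
    else
      loopA bank n (left + 1) (left + 2) beams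
  else beams
termination_by ((n - left).toNat, (n - right).toNat)
decreasing_by
  · exact Prod.Lex.left _ _ (by omega)
  · exact Prod.Lex.right _ (by omega)
  · exact Prod.Lex.left _ _ (by omega)

def numberOfBeams (bank : List String) : Int :=
  if bank.length < 2 then 0
  else loopA bank bank.length 0 1 0

-- ===== PORT B =====
def numberOfBeams_alt (bank : List String) : Int :=
  let nz := (bank.map (fun row => (PySem.Str.count row "1" : Int))).filter (fun c => c ≠ 0)
  ((nz.zip nz.tail).map (fun p => p.1 * p.2)).sum

-- ===== PRECONDITION & SPEC =====
def Spec_numberOfBeams (bank : List String) (out : Int) : Prop := out = numberOfBeams_alt bank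
instance (bank : List String) (out : Int) : Decidable (Spec_numberOfBeams bank out) := by unfold Spec_numberOfBeams; infer_instance

-- ===== CLAIM (what is proved, stated in full; the proofs are below) =====
def Claim_equal_numberOfBeams : Prop := ∀ (bank : List String), Dom_numberOfBeams bank → Spec_numberOfBeams bank (numberOfBeams bank)

-- ===== LEMMAS AND PROOFS =====

-- beam sum over a counts list, carrying the last nonzero count seen (none = not yet any)
def gfun : Option Int → List Int → Int
  | _, [] => 0
  | p, c :: rest => if c = 0 then gfun p rest else p.getD 0 * c + gfun (some c) rest

theorem gfun_cons (p : Option Int) (c : Int) (rest : List Int) :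
    gfun p (c :: rest) = if c = 0 then gfun p rest else p.getD 0 * c + gfun (some c) rest := rfl

theorem gfun_filter (l : List Int) (p : Option Int) :
    gfun p (l.filter (fun c => c ≠ 0)) = gfun p l := by
  induction l generalizing p with
  | nil => rfl
  | cons c rest ih =>
    simp only [ne_eq, decide_not] at ih ⊢
    rw [List.filter_cons]
    by_cases hc : c = 0
    · simp [hc, gfun, ih]
    · simp [hc, gfun, ih]

-- sum of products of consecutive entries
def adj (l : List Int) : Int := ((l.zip l.tail).map (fun p => p.1 * p.2)).sum

theorem gfun_some_eq_adj (l : List Int) (x : Int) (h : ∀ c ∈ l, c ≠ 0) :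
    gfun (some x) l = adj (x :: l) := by
  induction l generalizing x with
  | nil => simp [gfun, adj]
  | cons c rest ih =>
    have hc : c ≠ 0 := h c (by simp)
    simp only [gfun, hc, Option.getD]
    rw [ih c (fun d hd => h d (by simp [hd]))]
    simp [adj]

theorem gfun_none_eq_adj (l : List Int) (h : ∀ c ∈ l, c ≠ 0) : gfun none l = adj l := by
  cases l with
  | nil => rfl
  | cons x rest =>
    have hx : x ≠ 0 := h x (by simp)
    rw [show gfun none (x :: rest) = gfun (some x) rest from by simp [gfun, hx]]
    exact gfun_some_eq_adj rest x (fun d hd => h d (by simp [hd]))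

theorem alt_eq_gfun (bank : List String) :
    numberOfBeams_alt bank = gfun none (bank.map pyCount1) := by
  have hall : ∀ c ∈ (bank.map pyCount1).filter (fun c => c ≠ 0), c ≠ 0 := by
    intro c hc
    simpa using List.of_mem_filter hc
  have h1 : numberOfBeams_alt bank = adj ((bank.map pyCount1).filter (fun c => c ≠ 0)) := rfl
  rw [h1, ← gfun_filter (bank.map pyCount1) none, gfun_none_eq_adj _ hall]

-- skipping a block of zero counts does not change gfun
theorem gfun_drop_zeros (counts : List Int) (p : Option Int) :
    ∀ k a b : Nat, b - a ≤ k → a ≤ b → (∀ j : Nat, a ≤ j → j < b → counts.getD j 0 = 0) →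
      gfun p (counts.drop a) = gfun p (counts.drop b) := by
  intro k
  induction k with
  | zero =>
    intro a b h1 h2 _
    have hab : a = b := by omega
    rw [hab]
  | succ k ih =>
    intro a b h1 h2 hz
    by_cases hab : a = b
    · rw [hab]
    · have halt : a < b := by omega
      by_cases ha : a < counts.length
      · have hdrop : counts.drop a = counts[a] :: counts.drop (a + 1) :=
          List.drop_eq_getElem_cons ha
        have hz0 : counts[a] = 0 := by
          have := hz a (le_refl a) halt
          simpa [List.getD_eq_getElem?_getD, List.getElem?_eq_getElem ha] using this
        rw [hdrop]
        simp [gfun, hz0]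
        exact ih (a + 1) b (by omega) (by omega) (fun j hj1 hj2 => hz j (by omega) hj2)
      · have h1' : counts.drop a = [] := List.drop_eq_nil_of_le (by omega)
        have h2' : counts.drop b = [] := List.drop_eq_nil_of_le (by omega)
        rw [h1', h2']

-- bank[i] counted = the i-th entry of the counts list
theorem cnt_at (bank : List String) (l : Nat) (hl : l < bank.length) :
    pyCount1 ((PySem.List.pyGet? bank ((l : Nat) : Int)).getD "") = (bank.map pyCount1).getD l 0 := by
  simp [List.getD_eq_getElem?_getD, hl]

-- the pending value of A's left pointer
def pend (counts : List Int) (l : Nat) : Option Int :=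
  if counts.getD l 0 = 0 then none else some (counts.getD l 0)

-- main loop invariant: A's loop computes beams + gfun of the remaining suffix
theorem loopA_eq (bank : List String) :
    ∀ k m l r : Nat, ∀ beams : Int,
      bank.length - l ≤ k → bank.length - r ≤ m → l < r →
      (∀ j : Nat, l < j → j < r → (bank.map pyCount1).getD j 0 = 0) →
      loopA bank (bank.length : Int) (l : Int) (r : Int) beams =
        beams + gfun (pend (bank.map pyCount1) l) ((bank.map pyCount1).drop r) := by
  intro k
  induction k with
  | zero =>
    intro m l r beams hk hm hlr hz
    rw [loopA, dif_neg (by omega)]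
    rw [List.drop_eq_nil_of_le (by simp only [List.length_map]; omega)]
    simp [gfun]
  | succ k ihk =>
    intro m
    induction m with
    | zero =>
      intro l r beams hk hm hlr hz
      rw [loopA, dif_neg (by omega)]
      rw [List.drop_eq_nil_of_le (by simp only [List.length_map]; omega)]
      simp [gfun]
    | succ m ihm =>
      intro l r beams hk hm hlr hz
      by_cases hr : r < bank.length
      · have hl : l < bank.length := by omega
        have hlv := cnt_at bank l hl
        have hrv := cnt_at bank r hr
        rw [loopA, dif_pos (by constructor <;> [omega; omega])]
        simp only [hlv, hrv]
        have hrlen : r < (bank.map pyCount1).length := by simp only [List.length_map]; omega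
        have hdrop : (bank.map pyCount1).drop r =
            (bank.map pyCount1).getD r 0 :: (bank.map pyCount1).drop (r + 1) := by
          rw [List.drop_eq_getElem_cons hrlen]
          simp [List.getD_eq_getElem?_getD, List.getElem?_eq_getElem hrlen]
        split_ifs with h1 h2
        · -- both nonzero: pair up, left jumps to right
          have hc1 : ((r : Int) + 1) = ((r + 1 : Nat) : Int) := by push_cast; ring
          rw [hc1, ihk bank.length r (r + 1) _ (by omega) (by omega) (by omega)
            (fun j hj1 hj2 => absurd hj2 (by omega))]
          rw [hdrop]
          simp only [pend, if_neg h1.1, gfun, if_neg h1.2, Option.getD]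
          ring
        · -- right row empty: skip it
          have hc1 : ((r : Int) + 1) = ((r + 1 : Nat) : Int) := by push_cast; ring
          rw [hc1, ihm l (r + 1) beams (by omega) (by omega) (by omega)
            (fun j hj1 hj2 => by
              by_cases hjr : j < r
              · exact hz j hj1 hjr
              · have : j = r := by omega
                rw [this]; exact h2)]
          rw [hdrop, h2]
          simp [gfun]
        · -- left row empty: advance left, reset right
          have hcl : (bank.map pyCount1).getD l 0 = 0 := by
            by_cases hcr0 : (bank.map pyCount1).getD r 0 = 0
            · exact absurd hcr0 h2
            · by_contra hne; exact h1 ⟨hne, hcr0⟩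
          have hcr : (bank.map pyCount1).getD r 0 ≠ 0 := h2
          have hc1 : ((l : Int) + 1) = ((l + 1 : Nat) : Int) := by push_cast; ring
          have hc2 : ((l : Int) + 1 + 1) = ((l + 2 : Nat) : Int) := by push_cast; ring
          rw [show ((l : Int) + 2) = ((l + 2 : Nat) : Int) from by push_cast; ring,
            hc1, ihk bank.length (l + 1) (l + 2) beams (by omega) (by omega) (by omega)
            (fun j hj1 hj2 => absurd hj2 (by omega))]
          rw [show pend (bank.map pyCount1) l = none from by unfold pend; rw [if_pos hcl]]
          by_cases hcase : l + 1 = r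
          · rw [show l + 2 = r + 1 from by omega,
              show pend (bank.map pyCount1) (l + 1) = some ((bank.map pyCount1).getD r 0) from by
                rw [hcase]; unfold pend; rw [if_neg hcr]]
            rw [hdrop, gfun_cons, if_neg hcr]
            simp only [Option.getD_none]
            ring
          · have hz1 : (bank.map pyCount1).getD (l + 1) 0 = 0 := hz (l + 1) (by omega) (by omega)
            rw [show pend (bank.map pyCount1) (l + 1) = none from by unfold pend; rw [if_pos hz1]]
            rw [gfun_drop_zeros (bank.map pyCount1) none r (l + 2) r (by omega) (by omega)
              (fun j hj1 hj2 => hz j (by omega) hj2)]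
      · rw [loopA, dif_neg (by omega)]
        rw [List.drop_eq_nil_of_le (by simp only [List.length_map]; omega)]
        simp [gfun]

-- ===== VERDICT (by name: the statement is the Claim_ definition above) =====
theorem numberOfBeams_spec : Claim_equal_numberOfBeams := by
  intro bank _
  unfold Spec_numberOfBeams numberOfBeams
  rw [alt_eq_gfun]
  by_cases h2 : bank.length < 2
  · rw [if_pos h2]
    cases hb : bank.map pyCount1 with
    | nil => simp [gfun]
    | cons c t =>
      have hlen := congrArg List.length hb
      simp only [List.length_map, List.length_cons] at hlen
      have ht : t = [] := by
        cases t with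
        | nil => rfl
        | cons d u => simp at hlen; omega
      subst ht
      by_cases hc : c = 0 <;> simp [gfun, hc]
  · rw [if_neg h2]
    have h := loopA_eq bank bank.length bank.length 0 1 0 (by omega) (by omega) (by omega)
      (fun j hj1 hj2 => absurd hj2 (by omega))
    simp only [Nat.cast_zero, Nat.cast_one] at h
    rw [h]
    cases hb : bank.map pyCount1 with
    | nil =>
      have := congrArg List.length hb
      simp only [List.length_map, List.length_nil] at this
      omega
    | cons c t =>
      rw [show pend (c :: t) 0 = if c = 0 then none else some c from rfl,
          show (c :: t).drop 1 = t from rfl, gfun_cons]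
      by_cases hc : c = 0
      · rw [if_pos hc, if_pos hc]
        ring
      · rw [if_neg hc, if_neg hc]
        simp only [Option.getD_none]
        ring
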